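-- pv_equiv track=rewrite | github.com/MaximeParizot/AscNames | reduceV2.py | strtotab
-- ===== SOURCE A (Python) =====
-- def strtotab(s):
--     t=[]
--     digit=''
--     #if string is only a car do nothing
--     if len(s)==1 :
--         t=[s]
--     else :
--         for i in range(0,len(s)-1):  # else add digit together once the following char is not a digit
--             if s[i].isdigit():
--                 digit+=s[i]
--                 if not(s[i+1].isdigit()) :
--                     t.append(digit)
--                     digit=''
--             else :                   # add char when it's not a digit
--                 t.append(s[i])
--         # don't forget to add the last one
--         if s[len(s)-1].isdigit():
--             digit+=s[len(s)-1]
--             t.append(digit)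
--         else :
--             t.append(s[len(s)-1])
--     return t
-- ===== SOURCE B (Python) =====
-- def strtotab(s):
--     t = []
--     i = 0
--     n = len(s)
--     while i < n:
--         if s[i].isdigit():
--             j = i + 1
--             while j < n and s[j].isdigit():
--                 j += 1
--             t.append(s[i:j])
--             i = j
--         else:
--             t.append(s[i])
--             i += 1
--     return t
-- ===== Notes on version B (the rewrite author's own statement) =====
-- stated objective: simpler
-- what changed: Replaced A's index loop with one-character lookahead, a digit accumulator flushed when the next char is not a digit, and a duplicated special case for the last character (plus a len==1 shortcut) by a plain two-pointer run scan: at each position either emit the single non-digit char or scan the whole digit run with an inner loop and emit the slice.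
-- crash fix: On the empty string A raises IndexError (it indexes s[len(s)-1]); B naturally returns []. — e.g. on strtotab(""): A raises IndexError, B returns []
import Mathlib
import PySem

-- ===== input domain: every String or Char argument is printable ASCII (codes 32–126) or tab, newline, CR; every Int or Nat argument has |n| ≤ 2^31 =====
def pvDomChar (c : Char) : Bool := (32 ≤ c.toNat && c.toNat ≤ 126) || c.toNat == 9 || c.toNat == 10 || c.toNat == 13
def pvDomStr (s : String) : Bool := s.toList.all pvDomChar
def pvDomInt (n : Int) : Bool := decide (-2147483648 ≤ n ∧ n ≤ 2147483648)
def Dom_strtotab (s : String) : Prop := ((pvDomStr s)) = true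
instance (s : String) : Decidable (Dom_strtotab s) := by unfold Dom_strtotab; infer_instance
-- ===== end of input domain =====

-- B replaces A's lookahead-and-flush accumulator loop (with its separate last-character step)
-- by a plain two-pointer run scan: simpler, same cost. A raises IndexError on "", excluded by Pre_.

-- ===== PORT A =====
-- loop body of A's `for i in range(0, len(s)-1)`: state (t, digit), the digit accumulator as List Char
def pvStepA (l : List Char) (p : List String × List Char) (i : Int) : List String × List Char :=
  match PySem.List.pyGet? l i with
  | none => p
  | some c =>
    if PySem.Chars.isdigit c then
      let d := p.2 ++ [c]
      match PySem.List.pyGet? l (i + 1) with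
      | none => (p.1, d)
      | some c' => if !(PySem.Chars.isdigit c') then (p.1 ++ [String.ofList d], []) else (p.1, d)
    else (p.1 ++ [c.toString], p.2)

-- A's trailing "don't forget to add the last one" block (none = Python's IndexError on "")
def pvFinA (l : List Char) (n : Int) (st : List String × List Char) : List String :=
  match PySem.List.pyGet? l (n - 1) with
  | none => st.1
  | some c =>
    if PySem.Chars.isdigit c then st.1 ++ [String.ofList (st.2 ++ [c])]
    else st.1 ++ [c.toString]

def strtotab (s : String) : List String :=
  let l := s.toList
  if PySem.Str.len s = 1 then [s]
  else
    let n : Int := PySem.Str.len s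
    pvFinA l n ((PySem.List.pyRange 0 (n - 1) 1).foldl (pvStepA l) ([], []))

-- ===== PORT B =====
-- Source B's outer while-loop over the remaining suffix (fuel bounds the iteration count, as for any
-- while loop; fuel = length at the call site, so the `0, _ :: _` case is never reached):
-- at a digit, the inner `while` scans the run (takeWhile) and the slice s[i:j] is emitted whole,
-- otherwise the single char is emitted.
def pvAltGo : Nat → List Char → List String
  | _, [] => []
  | 0, _ :: _ => []
  | f + 1, c :: rest =>
    if PySem.Chars.isdigit c then
      String.ofList (c :: rest.takeWhile PySem.Chars.isdigit) ::
        pvAltGo f (rest.dropWhile PySem.Chars.isdigit)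
    else
      c.toString :: pvAltGo f rest

def strtotab_alt (s : String) : List String := pvAltGo s.toList.length s.toList

-- ===== PRECONDITION & SPEC =====
-- Pre_ excludes only the empty string, on which A raises IndexError (at s[len(s)-1]).
def Pre_strtotab (s : String) : Prop := s ≠ ""
instance (s : String) : Decidable (Pre_strtotab s) := by unfold Pre_strtotab; infer_instance
def pvWitness_strtotab : String := "ab12c3"

-- On the empty string A raises IndexError; B returns [].
def Raises_strtotab (s : String) : Prop := s = ""
instance (s : String) : Decidable (Raises_strtotab s) := by unfold Raises_strtotab; infer_instance
def pvRaiseWitness_strtotab : String := ""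
def pvRaiseWitnessOut_strtotab : List String := []

def Spec_strtotab (s : String) (out : List String) : Prop := out = strtotab_alt s
instance (s : String) (out : List String) : Decidable (Spec_strtotab s out) := by unfold Spec_strtotab; infer_instance

-- ===== CLAIM (what is proved, stated in full; the proofs are below) =====
def Claim_equal_strtotab : Prop := ∀ (s : String), Dom_strtotab s → Pre_strtotab s → Spec_strtotab s (strtotab s)
def Claim_raises_strtotab : Prop := (∀ (s : String), Dom_strtotab s → Raises_strtotab s → ¬ Pre_strtotab s) ∧ (Dom_strtotab (pvRaiseWitness_strtotab) ∧ Raises_strtotab (pvRaiseWitness_strtotab) ∧ strtotab_alt (pvRaiseWitness_strtotab) = pvRaiseWitnessOut_strtotab)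

-- ===== LEMMAS AND PROOFS =====

lemma pvAltGo_nil (f : Nat) : pvAltGo f [] = [] := by cases f <;> rfl

-- the fuel argument is irrelevant as long as it is at least the list length
lemma pvAltGo_congr : ∀ (f g : Nat) (l : List Char), l.length ≤ f → l.length ≤ g →
    pvAltGo f l = pvAltGo g l := by
  intro f
  induction f with
  | zero =>
    intro g l hf _
    have : l = [] := List.length_eq_zero_iff.mp (Nat.le_zero.mp hf)
    subst this
    simp [pvAltGo_nil]
  | succ f ih =>
    intro g l hf hg
    match l, g with
    | [], _ => simp [pvAltGo_nil]
    | c :: rest, 0 => simp at hg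
    | c :: rest, g + 1 =>
      simp only [List.length_cons, Nat.add_le_add_iff_right] at hf hg
      by_cases hc : PySem.Chars.isdigit c = true
      · have hd := List.length_dropWhile_le PySem.Chars.isdigit rest
        simp only [pvAltGo, hc, if_true]
        rw [ih g (rest.dropWhile PySem.Chars.isdigit) (le_trans hd hf) (le_trans hd hg)]
      · simp only [pvAltGo, hc, Bool.false_eq_true, if_false]
        rw [ih g rest hf hg]

-- canonical-fuel form of B's scan
def pvAlt (l : List Char) : List String := pvAltGo l.length l

lemma pvAlt_cons (c : Char) (rest : List Char) :
    pvAlt (c :: rest) =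
      if PySem.Chars.isdigit c then
        String.ofList (c :: rest.takeWhile PySem.Chars.isdigit) ::
          pvAlt (rest.dropWhile PySem.Chars.isdigit)
      else c.toString :: pvAlt rest := by
  have hd := List.length_dropWhile_le PySem.Chars.isdigit rest
  by_cases hc : PySem.Chars.isdigit c = true
  · simp only [pvAlt, List.length_cons, pvAltGo, hc, if_true]
    congr 1
    exact pvAltGo_congr _ _ _ (by omega) (by omega)
  · simp only [pvAlt, List.length_cons, pvAltGo, hc, Bool.false_eq_true, if_false]

-- reference recursion equal to A's loop on the suffix starting at the current char,
-- with digit accumulator d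
def pvGRef : Char → List Char → List Char → List String
  | c, [], d => if PySem.Chars.isdigit c then [String.ofList (d ++ [c])] else [c.toString]
  | c, c' :: r, d =>
    if PySem.Chars.isdigit c then
      if PySem.Chars.isdigit c' then pvGRef c' r (d ++ [c])
      else String.ofList (d ++ [c]) :: pvGRef c' r []
    else c.toString :: pvGRef c' r d

lemma pvGRef_eq_alt (rest : List Char) :
    (∀ c d, PySem.Chars.isdigit c = true →
      pvGRef c rest d = String.ofList (d ++ c :: rest.takeWhile PySem.Chars.isdigit) ::
        pvAlt (rest.dropWhile PySem.Chars.isdigit)) ∧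
    (∀ c, pvGRef c rest [] = pvAlt (c :: rest)) := by
  induction rest with
  | nil =>
    constructor
    · intro c d hc; simp [pvGRef, hc, pvAlt, pvAltGo]
    · intro c
      by_cases hc : PySem.Chars.isdigit c = true <;> simp [pvGRef, pvAlt, pvAltGo, hc]
  | cons c' r ih =>
    have h1 : ∀ c d, PySem.Chars.isdigit c = true →
        pvGRef c (c' :: r) d = String.ofList (d ++ c :: (c' :: r).takeWhile PySem.Chars.isdigit) ::
          pvAlt ((c' :: r).dropWhile PySem.Chars.isdigit) := by
      intro c d hc
      by_cases hc' : PySem.Chars.isdigit c' = true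
      · simp only [pvGRef, hc, hc', if_true]
        rw [ih.1 c' (d ++ [c]) hc']
        simp [hc']
      · simp only [pvGRef, hc, hc', if_true, Bool.false_eq_true, if_false]
        simp only [List.takeWhile_cons, List.dropWhile_cons, hc', Bool.false_eq_true, if_false]
        simp [ih.2 c']
    refine ⟨h1, ?_⟩
    intro c
    have e := pvAlt_cons c (c' :: r)
    by_cases hc : PySem.Chars.isdigit c = true
    · rw [if_pos hc] at e
      rw [h1 c [] hc, e]
      simp
    · rw [if_neg hc] at e
      simp only [pvGRef, hc, Bool.false_eq_true, if_false]
      rw [ih.2 c', e]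

lemma pvLoopA (l : List Char) :
    ∀ (rest : List Char) (c : Char) (i : Nat) (t : List String) (d : List Char),
      l.drop i = c :: rest →
      pvFinA l (l.length : Int)
          ((PySem.List.pyRange (i : Int) ((l.length : Int) - 1) 1).foldl (pvStepA l) (t, d)) =
        t ++ pvGRef c rest d := by
  intro rest
  induction rest with
  | nil =>
    intro c i t d h
    have hlen : l.length = i + 1 := by
      have := congrArg List.length h
      simp [List.length_drop] at this
      omega
    have hget : l[i]? = some c := by
      have : (l.drop i)[0]? = some c := by rw [h]; rfl
      simpa [List.getElem?_drop] using this
    have hrange : PySem.List.pyRange (i : Int) ((l.length : Int) - 1) 1 = [] := by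
      apply PySem.List.pyRange_one_eq_nil; omega
    rw [hrange]
    simp only [List.foldl_nil, pvFinA]
    have : ((l.length : Int) - 1) = (i : Int) := by omega
    rw [this, PySem.List.pyGet?_natCast, hget]
    by_cases hc : PySem.Chars.isdigit c = true <;> simp [pvGRef, hc]
  | cons c' r ih =>
    intro c i t d h
    have hlen : l.length = i + 2 + r.length := by
      have := congrArg List.length h
      simp [List.length_drop] at this
      omega
    have hget : l[i]? = some c := by
      have : (l.drop i)[0]? = some c := by rw [h]; rfl
      simpa [List.getElem?_drop] using this
    have hdrop' : l.drop (i + 1) = c' :: r := by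
      have h2 : l.drop (i + 1) = (l.drop i).drop 1 := by rw [List.drop_drop]
      rw [h2, h]
      rfl
    have hget' : l[i + 1]? = some c' := by
      have : (l.drop (i + 1))[0]? = some c' := by rw [hdrop']; rfl
      simpa [List.getElem?_drop] using this
    have hcons : PySem.List.pyRange (i : Int) ((l.length : Int) - 1) 1 =
        (i : Int) :: PySem.List.pyRange ((i : Int) + 1) ((l.length : Int) - 1) 1 := by
      apply PySem.List.pyRange_one_cons; omega
    rw [hcons]
    simp only [List.foldl_cons]
    have hstep : ∀ st : List String × List Char, pvStepA l st (i : Int) =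
        (if PySem.Chars.isdigit c then
          (if PySem.Chars.isdigit c' then (st.1, st.2 ++ [c])
           else (st.1 ++ [String.ofList (st.2 ++ [c])], []))
         else (st.1 ++ [c.toString], st.2)) := by
      intro st
      simp only [pvStepA]
      rw [show ((i : Int) + 1) = ((i + 1 : Nat) : Int) by push_cast; ring]
      rw [PySem.List.pyGet?_natCast, PySem.List.pyGet?_natCast, hget, hget']
      by_cases hc : PySem.Chars.isdigit c = true <;>
        by_cases hc' : PySem.Chars.isdigit c' = true <;> simp [hc, hc']
    rw [hstep]
    have hcast : ((i : Int) + 1) = ((i + 1 : Nat) : Int) := by push_cast; ring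
    by_cases hc : PySem.Chars.isdigit c = true <;>
      by_cases hc' : PySem.Chars.isdigit c' = true <;>
      simp only [hc, hc', if_true, Bool.false_eq_true, if_false] <;>
      rw [hcast, ih c' (i + 1) _ _ hdrop'] <;>
      simp [pvGRef, hc, hc']

lemma strtotab_eq (s : String) (h : s ≠ "") : strtotab s = strtotab_alt s := by
  have hne : s.toList ≠ [] := fun hnil => h (by
    have := congrArg String.ofList hnil
    simpa [String.ofList_toList] using this)
  obtain ⟨c, rest, hl⟩ : ∃ c rest, s.toList = c :: rest := by
    cases hx : s.toList with
    | nil => exact absurd hx hne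
    | cons a b => exact ⟨a, b, rfl⟩
  have halt : strtotab_alt s = pvAlt s.toList := rfl
  unfold strtotab
  have hlen : PySem.Str.len s = (s.toList.length : Int) := by
    simp [PySem.Str.len_eq]
  by_cases h1 : PySem.Str.len s = 1
  · -- single character
    have hone : s.toList.length = 1 := by rw [hlen] at h1; exact_mod_cast h1
    have hrest : rest = [] := by rw [hl] at hone; simpa using hone
    subst hrest
    simp only [h1, if_true]
    rw [halt, hl]
    have hs : s = String.ofList [c] := by rw [← hl, String.ofList_toList]
    have hsing : String.ofList [c] = String.singleton c := String.toByteArray_inj.mp rfl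
    by_cases hc : PySem.Chars.isdigit c = true <;>
      simp [pvAlt, pvAltGo, hc, hs, hsing]
  · simp only [h1, if_false]
    rw [hlen]
    have h0 : s.toList.drop 0 = c :: rest := by simpa using hl
    have hmain := pvLoopA s.toList rest c 0 [] [] h0
    simp only [Nat.cast_zero] at hmain
    rw [hmain, halt, hl]
    exact (pvGRef_eq_alt rest).2 c

-- ===== VERDICT (by name: the statement is the Claim_ definition above) =====
theorem strtotab_spec : Claim_equal_strtotab := by
  intro s _ hpre
  unfold Spec_strtotab
  exact strtotab_eq s hpre

@[simp]
theorem strtotab_raises : Claim_raises_strtotab := by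
  unfold Claim_raises_strtotab
  exact ⟨fun s _ hr hp => hp hr, by decide⟩
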